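-- pv_equiv track=rewrite | github.com/solresol/padjective | padjective/tagbattle.py | filter_nested_tags
-- ===== SOURCE A (Python) =====
-- from typing import Iterable, List, Dict
--
-- def filter_nested_tags(tags: Iterable[str]) -> List[str]:
--     """Remove tags that are substrings of other tags.
--
--     Tags are compared case-insensitively and returned in their original order
--     without duplicates.
--     """
--     unique: List[str] = []
--     seen = set()
--     for tag in tags:
--         tag = tag.strip()
--         if not tag or tag.lower() in seen:
--             continue
--         unique.append(tag)
--         seen.add(tag.lower())
--
--     filtered: List[str] = []
--     for tag in unique:
--         tag_lower = tag.lower()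
--         if any(
--             tag_lower != other.lower() and tag_lower in other.lower()
--             for other in unique
--         ):
--             continue
--         filtered.append(tag)
--     return filtered
-- ===== SOURCE B (Python) =====
-- def filter_nested_tags(tags):
--     """Remove tags that are substrings of other tags (case-insensitive),
--     keeping original order without duplicates.
--
--     Instead of scanning all other tags for each tag, index every distinct
--     substring of each deduplicated lowered tag in a counter; a tag survives
--     iff its lowered form is a substring of exactly one indexed tag (itself).
--     """
--     unique = {}
--     for tag in tags:
--         t = tag.strip()
--         if t:
--             unique.setdefault(t.lower(), t)
--     counts = {}
--     for low in unique:
--         for sub in {low[i:j] for i in range(len(low)) for j in range(i + 1, len(low) + 1)}: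
--             counts[sub] = counts.get(sub, 0) + 1
--     return [t for low, t in unique.items() if counts[low] == 1]
-- ===== Notes on version B (the rewrite author's own statement) =====
-- stated objective: faster
-- what changed: Instead of scanning all other unique tags for each tag (quadratic in the number of tags), B builds a counter indexing every distinct substring of each deduplicated lowered tag and keeps a tag iff its lowered form is counted exactly once (only in itself); dedup is done with a single insertion-ordered dict instead of a list plus a seen-set.
import Mathlib
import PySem

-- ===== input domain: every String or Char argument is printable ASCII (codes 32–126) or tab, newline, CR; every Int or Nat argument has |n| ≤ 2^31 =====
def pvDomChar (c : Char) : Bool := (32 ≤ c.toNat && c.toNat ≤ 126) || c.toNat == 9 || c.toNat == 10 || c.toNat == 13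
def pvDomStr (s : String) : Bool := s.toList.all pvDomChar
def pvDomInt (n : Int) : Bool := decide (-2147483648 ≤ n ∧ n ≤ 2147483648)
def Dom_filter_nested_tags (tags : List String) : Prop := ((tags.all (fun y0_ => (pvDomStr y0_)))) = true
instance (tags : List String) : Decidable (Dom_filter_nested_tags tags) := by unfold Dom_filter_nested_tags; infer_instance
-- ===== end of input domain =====

-- B replaces A's per-tag scan over all other tags by a counter indexing every
-- distinct substring of each deduplicated lowered tag, removing the quadratic
-- pairwise scan (objective: faster; measured).

-- ===== PORT A =====
-- the body of A's first for-loop (dedup by lowered stripped tag)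
def pvAStep (acc : List String × PySem.Set String) (tag : String) : List String × PySem.Set String :=
  let tag := PySem.Str.strip tag
  if tag == "" || PySem.Set.contains acc.2 (PySem.Str.lower tag) then acc
  else (acc.1 ++ [tag], PySem.Set.add acc.2 (PySem.Str.lower tag))

def filter_nested_tags (tags : List String) : List String :=
  let st := tags.foldl pvAStep ([], PySem.Set.empty)
  let unique := st.1
  unique.foldl (fun filtered tag =>
    let tagLower := PySem.Str.lower tag
    if unique.any (fun other =>
        (tagLower != PySem.Str.lower other) && PySem.Str.isIn tagLower (PySem.Str.lower other))
    then filtered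
    else filtered ++ [tag]) []

-- ===== PORT B =====
-- the body of B's first for-loop (dedup into an insertion-ordered dict)
def pvBStep (unique : PySem.Dict String String) (tag : String) : PySem.Dict String String :=
  let t := PySem.Str.strip tag
  if t == "" then unique else unique.setdefault (PySem.Str.lower t) t

-- the set comprehension {low[i:j] for i in range(len(low)) for j in range(i+1, len(low)+1)}
def pvAllSubs (low : String) : PySem.Set String :=
  PySem.Set.ofList
    ((PySem.List.pyRange 0 (PySem.Str.len low) 1).flatMap (fun i =>
      (PySem.List.pyRange (i + 1) (PySem.Str.len low + 1) 1).map (fun j =>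
        PySem.Str.slice low (some i) (some j))))

def filter_nested_tags_alt (tags : List String) : List String :=
  let unique : PySem.Dict String String := tags.foldl pvBStep PySem.Dict.empty
  let counts : PySem.Dict String Int := unique.keys.foldl (fun counts low =>
    (pvAllSubs low).foldl (fun counts sub => counts.insert sub (counts.getD sub 0 + 1)) counts)
    PySem.Dict.empty
  (unique.items.filter (fun p => counts.getD p.1 0 == 1)).map (·.2)

-- ===== PRECONDITION & SPEC =====
def Spec_filter_nested_tags (tags : List String) (out : List String) : Prop := out = filter_nested_tags_alt tags
instance (tags : List String) (out : List String) : Decidable (Spec_filter_nested_tags tags out) := by unfold Spec_filter_nested_tags; infer_instance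

-- ===== CLAIM (what is proved, stated in full; the proofs are below) =====
def Claim_equal_filter_nested_tags : Prop := ∀ (tags : List String), Dom_filter_nested_tags tags → Spec_filter_nested_tags tags (filter_nested_tags tags)

-- ===== LEMMAS AND PROOFS =====

lemma pv_dict_eq_of_items {κ ν : Type} (d e : PySem.Dict κ ν) (h : d.items = e.items) : d = e := by
  cases d; cases e; cases h; rfl

-- Stage 1: A's (unique, seen) loop and B's dict loop build the same data.
lemma pv_stage1 (tags : List String) (u : List String)
    (hnd : (u.map PySem.Str.lower).Nodup) :
    (tags.foldl pvAStep (u, (u.map PySem.Str.lower : PySem.Set String))).2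
      = ((tags.foldl pvAStep (u, (u.map PySem.Str.lower : PySem.Set String))).1.map PySem.Str.lower : PySem.Set String)
    ∧ ((tags.foldl pvAStep (u, (u.map PySem.Str.lower : PySem.Set String))).1.map PySem.Str.lower).Nodup
    ∧ tags.foldl pvBStep (PySem.Dict.mk (u.map (fun t => (PySem.Str.lower t, t))))
        = PySem.Dict.mk ((tags.foldl pvAStep (u, (u.map PySem.Str.lower : PySem.Set String))).1.map (fun t => (PySem.Str.lower t, t))) := by
  induction tags generalizing u with
  | nil => exact ⟨rfl, hnd, rfl⟩
  | cons tag rest ih =>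
    simp only [List.foldl_cons]
    by_cases h0 : PySem.Str.strip tag == ""
    · have hA : pvAStep (u, (u.map PySem.Str.lower : PySem.Set String)) tag = (u, (u.map PySem.Str.lower : PySem.Set String)) := by
        simp [pvAStep, h0]
      have hB : pvBStep (PySem.Dict.mk (u.map (fun t => (PySem.Str.lower t, t)))) tag
          = PySem.Dict.mk (u.map (fun t => (PySem.Str.lower t, t))) := by
        simp [pvBStep, h0]
      rw [hA, hB]; exact ih u hnd
    · by_cases hc : PySem.Str.lower (PySem.Str.strip tag) ∈ u.map PySem.Str.lower
      · have hA : pvAStep (u, (u.map PySem.Str.lower : PySem.Set String)) tag = (u, (u.map PySem.Str.lower : PySem.Set String)) := by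
          simp [pvAStep, h0, PySem.Set.contains_eq_listContains, hc]
        have hB : pvBStep (PySem.Dict.mk (u.map (fun t => (PySem.Str.lower t, t)))) tag
            = PySem.Dict.mk (u.map (fun t => (PySem.Str.lower t, t))) := by
          simp only [pvBStep, h0, if_neg (by simpa using h0)]
          apply PySem.Dict.setdefault_of_contains
          rw [PySem.Dict.contains_mk]
          simp only [List.any_map, List.any_eq_true]
          obtain ⟨x, hx, he⟩ := List.mem_map.1 hc
          exact ⟨x, hx, by simp [he]⟩
        rw [hA, hB]; exact ih u hnd
      · have hA : pvAStep (u, (u.map PySem.Str.lower : PySem.Set String)) tag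
            = (u ++ [PySem.Str.strip tag], ((u ++ [PySem.Str.strip tag]).map PySem.Str.lower : PySem.Set String)) := by
          simp only [pvAStep]
          rw [if_neg, PySem.Set.add]
          · rw [if_neg]
            · simp
            · simpa [PySem.Set.contains_eq_listContains] using hc
          · simp only [Bool.or_eq_true, not_or]
            exact ⟨by simpa using h0, by simpa [PySem.Set.contains_eq_listContains] using hc⟩
        have hcon : (PySem.Dict.mk (u.map (fun t => (PySem.Str.lower t, t)))).contains
            (PySem.Str.lower (PySem.Str.strip tag)) = false := by
          rw [PySem.Dict.contains_mk, List.any_eq_false]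
          intro p hp
          obtain ⟨x, hx, rfl⟩ := List.mem_map.1 hp
          intro he
          exact hc (List.mem_map.2 ⟨x, hx, by simpa using he⟩)
        have hB : pvBStep (PySem.Dict.mk (u.map (fun t => (PySem.Str.lower t, t)))) tag
            = PySem.Dict.mk ((u ++ [PySem.Str.strip tag]).map (fun t => (PySem.Str.lower t, t))) := by
          simp only [pvBStep]
          rw [if_neg h0, PySem.Dict.setdefault_of_not_contains _ _ hcon]
          apply pv_dict_eq_of_items
          rw [PySem.Dict.items_insert_of_not_contains _ _ hcon]
          simp
        rw [hA, hB]
        apply ih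
        simp only [List.map_append, List.map_cons, List.map_nil]
        exact List.Nodup.append hnd (List.nodup_singleton _) (by simpa using hc)

-- Stage 1 corollary: each kept tag is nonempty.
lemma pv_stage1_nonempty (tags : List String) (u : List String) (seen : PySem.Set String)
    (hne : ∀ x ∈ u, x.toList ≠ []) :
    ∀ x ∈ (tags.foldl pvAStep (u, seen)).1, x.toList ≠ [] := by
  induction tags generalizing u seen with
  | nil => exact hne
  | cons tag rest ih =>
    simp only [List.foldl_cons, pvAStep]
    split
    · exact ih u seen hne
    · rename_i h
      apply ih
      intro x hx
      rcases List.mem_append.1 hx with hx | hx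
      · exact hne x hx
      · simp only [List.mem_singleton] at hx
        subst hx
        simp only [Bool.or_eq_true, not_or] at h
        intro hnil
        have hstr : PySem.Str.strip tag = "" := String.ext (by rw [hnil]; rfl)
        exact h.1 (by simp [hstr])

-- Stage 2: the nested counting loop computes countP over the key list.
lemma pv_counts_getD (ks : List String) (d : PySem.Dict String Int) (v : String) :
    (ks.foldl (fun counts low =>
        (pvAllSubs low).foldl (fun counts sub => counts.insert sub (counts.getD sub 0 + 1)) counts) d).getD v 0
      = d.getD v 0 + (ks.countP (fun k => decide (v ∈ pvAllSubs k)) : Int) := by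
  induction ks generalizing d with
  | nil => simp
  | cons k rest ih =>
    simp only [List.foldl_cons, List.countP_cons]
    rw [ih, PySem.Dict.getD_foldl_insert_add_one]
    have hcnt : List.count v (pvAllSubs k) = if decide (v ∈ pvAllSubs k) = true then 1 else 0 := by
      by_cases hm : v ∈ pvAllSubs k
      · simp only [hm, decide_true]
        exact List.count_eq_one_of_mem (PySem.Set.nodup_ofList _) hm
      · simp [hm, List.count_eq_zero_of_not_mem hm]
    rw [hcnt]
    by_cases hm : v ∈ pvAllSubs k <;> simp [hm] <;> push_cast <;> ring

-- Stage 3: membership in the substring set is exactly infix (for nonempty v).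
lemma pv_mem_allSubs (v k : String) (hv : v.toList ≠ []) :
    v ∈ pvAllSubs k ↔ v.toList <:+: k.toList := by
  have hlen : PySem.Str.len k = (k.toList.length : Int) := by
    simp [PySem.Str.len]
  constructor
  · intro h
    rw [pvAllSubs, PySem.Set.mem_ofList] at h
    obtain ⟨i, hi, w, hj, rfl⟩ := by
      simpa only [List.mem_flatMap, List.mem_map] using h
    rw [PySem.List.mem_pyRange_iff_of_pos one_pos] at hi hj
    obtain ⟨hi0, hiN, -⟩ := hi
    obtain ⟨hj1, hjN, -⟩ := hj
    have h1 : (PySem.Str.slice k (some i) (some w)).toList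
        = (k.toList.drop i.toNat).take (w.toNat - i.toNat) := by
      rw [PySem.Str.toList_slice, PySem.Chars.slice_eq_listSlice,
        PySem.List.slice_toNat _ hi0 (by omega)]
    rw [h1]
    exact ((List.take_prefix _ _).isInfix).trans ((List.drop_suffix _ _).isInfix)
  · intro h
    obtain ⟨s, t, hst⟩ := h
    have hvlen : 0 < v.toList.length := List.length_pos_iff.2 hv
    have hk : k.toList = s ++ (v.toList ++ t) := by rw [← hst]; simp
    have hkl : k.toList.length = s.length + (v.toList.length + t.length) := by
      rw [hk]; simp
    rw [pvAllSubs, PySem.Set.mem_ofList]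
    simp only [List.mem_flatMap, List.mem_map]
    refine ⟨(s.length : Int), ?_, ⟨((s.length + v.toList.length : Nat) : Int), ?_, ?_⟩⟩
    · rw [PySem.List.mem_pyRange_iff_of_pos one_pos, hlen]
      refine ⟨by positivity, by push_cast; omega, one_dvd _⟩
    · rw [PySem.List.mem_pyRange_iff_of_pos one_pos, hlen]
      refine ⟨by push_cast; omega, by push_cast; omega, one_dvd _⟩
    · apply String.ext
      rw [PySem.Str.toList_slice, PySem.Chars.slice_eq_listSlice,
        PySem.List.slice_natCast, hk]
      rw [List.drop_left, Nat.add_sub_cancel_left, List.take_left]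

-- counting helper on a Nodup list
lemma pv_countP_eq_one_iff {l : List String} (hnd : l.Nodup) {a : String} (ha : a ∈ l)
    (p : String → Bool) (hpa : p a = true) :
    (l.countP p = 1) ↔ ∀ k ∈ l, k ≠ a → p k = false := by
  have hcongr : ∀ _ : (∀ k ∈ l, k ≠ a → p k = false), l.countP p = l.countP (fun x => x == a) := by
    intro h
    apply List.countP_congr
    intro x hx
    by_cases hxa : x = a
    · subst hxa; simp [hpa]
    · simp [h x hx hxa, hxa]
  constructor
  · intro h1 k hk hka
    by_contra hpk
    have hpk' : p k = true := by simpa using hpk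
    rw [List.countP_eq_length_filter] at h1
    obtain ⟨x, hx⟩ := List.length_eq_one_iff.1 h1
    have hk' : k ∈ l.filter p := List.mem_filter.2 ⟨hk, hpk'⟩
    have ha' : a ∈ l.filter p := List.mem_filter.2 ⟨ha, hpa⟩
    rw [hx, List.mem_singleton] at hk' ha'
    exact hka (hk'.trans ha'.symm)
  · intro h
    rw [hcongr h]
    have hcount : l.countP (fun x => x == a) = l.count a := rfl
    rw [hcount, List.count_eq_one_of_mem hnd ha]

-- A's keep/drop loop is a filter
lemma pv_foldl_if (c : String → Bool) (l acc : List String) :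
    l.foldl (fun filtered tag => if c tag = true then filtered else filtered ++ [tag]) acc
      = acc ++ l.filter (fun t => !c t) := by
  have h : (fun (filtered : List String) tag => if c tag = true then filtered else filtered ++ [tag])
      = (fun (filtered : List String) tag => if (!c tag) = true then filtered ++ [id tag] else filtered) := by
    funext a t
    cases hcv : c t <;> simp [hcv]
  rw [h, PySem.List.foldl_append_if, List.map_id]

-- lower of a nonempty string is nonempty
lemma pv_lower_ne_nil {x : String} (h : x.toList ≠ []) : (PySem.Str.lower x).toList ≠ [] := by
  rw [PySem.Str.toList_lower, PySem.Chars.lower]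
  simpa using h

-- ===== VERDICT (by name: the statement is the Claim_ definition above) =====
set_option maxHeartbeats 1000000 in
theorem filter_nested_tags_spec : Claim_equal_filter_nested_tags := by
  intro tags _hdom
  show filter_nested_tags tags = filter_nested_tags_alt tags
  obtain ⟨hsnd, hnd, hdict⟩ := pv_stage1 tags [] (by simp)
  simp only [List.map_nil] at hsnd hnd hdict
  simp only [filter_nested_tags, filter_nested_tags_alt, PySem.Set.empty, PySem.Dict.empty]
  set U : List String := (tags.foldl pvAStep ([], ([] : List String))).1 with hU
  have hUne : ∀ x ∈ U, x.toList ≠ [] := pv_stage1_nonempty tags [] _ (by simp)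
  rw [hdict]
  have hkeys : (PySem.Dict.mk (U.map (fun t => (PySem.Str.lower t, t)))).keys = U.map PySem.Str.lower := by
    rw [PySem.Dict.keys_mk, List.map_map]; rfl
  rw [hkeys]
  rw [show (PySem.Dict.mk (U.map (fun t => (PySem.Str.lower t, t)))).items
      = U.map (fun t => (PySem.Str.lower t, t)) from rfl]
  set counts : PySem.Dict String Int :=
    (U.map PySem.Str.lower).foldl (fun counts low =>
      (pvAllSubs low).foldl (fun counts sub => counts.insert sub (counts.getD sub 0 + 1)) counts)
      (PySem.Dict.mk []) with hcounts
  set cond : String → Bool := fun tag =>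
    U.any (fun other =>
      (PySem.Str.lower tag != PySem.Str.lower other) && PySem.Str.isIn (PySem.Str.lower tag) (PySem.Str.lower other)) with hcond
  -- pointwise agreement of the two keep/drop tests
  have key : ∀ t ∈ U, (!cond t) = (counts.getD (PySem.Str.lower t) 0 == 1) := by
    intro t ht
    have hlow : (PySem.Str.lower t).toList ≠ [] := pv_lower_ne_nil (hUne t ht)
    have hgetD : counts.getD (PySem.Str.lower t) 0
        = ((U.map PySem.Str.lower).countP (fun k => decide ((PySem.Str.lower t).toList <:+: k.toList)) : Int) := by
      rw [hcounts, pv_counts_getD]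
      have hcp : (U.map PySem.Str.lower).countP (fun k => decide (PySem.Str.lower t ∈ pvAllSubs k))
          = (U.map PySem.Str.lower).countP (fun k => decide ((PySem.Str.lower t).toList <:+: k.toList)) := by
        apply List.countP_congr
        intro k _hk
        simpa using pv_mem_allSubs (PySem.Str.lower t) k hlow
      rw [hcp]
      rw [show (PySem.Dict.mk ([] : List (String × Int))).getD (PySem.Str.lower t) 0 = 0 from rfl]
      ring
    have hmem : PySem.Str.lower t ∈ U.map PySem.Str.lower := List.mem_map_of_mem ht
    have hself : (fun k => decide ((PySem.Str.lower t).toList <:+: k.toList)) (PySem.Str.lower t) = true := by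
      simp [List.infix_refl]
    have hiff := pv_countP_eq_one_iff hnd hmem
      (fun k => decide ((PySem.Str.lower t).toList <:+: k.toList)) hself
    have hcf : (cond t = false) ↔
        ((U.map PySem.Str.lower).countP (fun k => decide ((PySem.Str.lower t).toList <:+: k.toList)) = 1) := by
      rw [hiff, hcond]
      simp only [List.any_eq_false, Bool.and_eq_true, not_and, bne_iff_ne, ne_eq,
        PySem.Str.isIn_iff_infix]
      constructor
      · intro h k hk hka
        obtain ⟨o, ho, rfl⟩ := List.mem_map.1 hk
        simp only [decide_eq_false_iff_not]
        exact h o ho (fun he => hka he.symm)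
      · intro h o ho hne'
        have := h (PySem.Str.lower o) (List.mem_map_of_mem ho) (fun he => hne' he.symm)
        simpa using this
    cases hcv : cond t
    · simp only [Bool.not_false]
      rw [hgetD, hcf.1 hcv]
      simp
    · simp only [Bool.not_true]
      rw [hgetD]
      have h1 : ¬ ((U.map PySem.Str.lower).countP (fun k => decide ((PySem.Str.lower t).toList <:+: k.toList)) = 1) := by
        intro hx
        rw [← hcf] at hx
        rw [hx] at hcv
        cases hcv
      symm
      simp only [beq_eq_false_iff_ne, ne_eq]
      intro hx
      exact h1 (by exact_mod_cast hx)
  -- A side: the append-loop is a filter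
  have hA : List.foldl (fun (filtered : List String) tag =>
      if cond tag = true then filtered else filtered ++ [tag]) [] U
      = U.filter (fun t => !cond t) :=
    (pv_foldl_if cond U []).trans (List.nil_append _)
  have hB : List.map (fun x : String × String => x.2)
      (List.filter (fun p => counts.getD p.1 0 == 1) (List.map (fun t => (PySem.Str.lower t, t)) U))
      = U.filter (fun t => counts.getD (PySem.Str.lower t) 0 == 1) := by
    rw [List.filter_map, List.map_map]
    rw [show ((fun x : String × String => x.2) ∘ fun t => (PySem.Str.lower t, t)) = id from rfl, List.map_id]
    apply List.filter_congr
    intro t _ht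
    rfl
  have hC : U.filter (fun t => !cond t) = U.filter (fun t => counts.getD (PySem.Str.lower t) 0 == 1) :=
    List.filter_congr key
  exact hA.trans (hC.trans hB.symm)
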